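-- pv_equiv track=rewrite | github.com/NicoAV2311/PACMAN | PACMAN.py | is_map_playable
-- ===== SOURCE A (Python) =====
-- from collections import deque, namedtuple
--
-- Point = namedtuple("Point", ["r","c"])
--
-- def neighbors_of(pt, grid):
--     rows = len(grid); cols = len(grid[0])
--     # allow wrap-around through tunnels at center row(s)
--     tunnel_rows = {rows//2}
--     for dr, dc in [(-1,0),(1,0),(0,-1),(0,1)]:
--         nr, nc = pt.r+dr, pt.c+dc
--         # normal neighbor
--         if 0 <= nr < rows and 0 <= nc < cols:
--             if grid[nr][nc] != 1:
--                 yield Point(nr,nc)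
--         else:
--             # handle horizontal wrap (tunnel)
--             if dc == -1 and nc < 0 and pt.r in tunnel_rows:
--                 # wrap to right edge
--                 if grid[pt.r][cols-1] != 1:
--                     yield Point(pt.r, cols-1)
--             elif dc == 1 and nc >= cols and pt.r in tunnel_rows:
--                 # wrap to left edge
--                 if grid[pt.r][0] != 1:
--                     yield Point(pt.r, 0)
--
-- def reachable_from(start, grid):
--     """Return set of Points reachable from start using neighbors_of."""
--     rows = len(grid); cols = len(grid[0])
--     if not (0 <= start.r < rows and 0 <= start.c < cols):
--         return set()
--     q = deque([Point(start.r, start.c)])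
--     seen = {Point(start.r, start.c)}
--     while q:
--         u = q.popleft()
--         for v in neighbors_of(u, grid):
--             if v not in seen:
--                 seen.add(v); q.append(v)
--     return seen
--
-- def is_map_playable(grid):
--     """Validate map: player spawn must exist and all pellets must be reachable from player."""
--     rows = len(grid); cols = len(grid[0])
--     # find player spawn
--     player_pos = None
--     for r in range(rows):
--         for c in range(cols):
--             if grid[r][c] == 3:
--                 player_pos = Point(r, c); break
--         if player_pos: break
--     if not player_pos:
--         return False
--     reachable = reachable_from(player_pos, grid)
--     # check all pellet tiles (0 and 2) are reachable
--     for r in range(rows):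
--         for c in range(cols):
--             if grid[r][c] in (0, 2):
--                 if Point(r, c) not in reachable:
--                     return False
--     return True
-- ===== SOURCE B (Python) =====
-- def is_map_playable(grid):
--     """Validate map: player spawn must exist and all pellets must be reachable from player.
--
--     Re-implementation: instead of a BFS with an explicit queue, the reachable
--     region is computed by round-based label propagation (saturate the marked
--     set until it stops growing)."""
--     rows = len(grid)
--     cols = len(grid[0])
--     tunnel_row = rows // 2
--
--     player = next(((r, c) for r, row in enumerate(grid)
--                    for c, v in enumerate(row[:cols]) if v == 3), None)
--     if player is None:
--         return False
--
--     def nbrs(r, c):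
--         cand = [(r - 1, c), (r + 1, c)]
--         if r == tunnel_row:
--             cand += [(r, (c - 1) % cols), (r, (c + 1) % cols)]
--         else:
--             cand += [(r, c - 1), (r, c + 1)]
--         return [(nr, nc) for nr, nc in cand
--                 if 0 <= nr < rows and 0 <= nc < cols and grid[nr][nc] != 1]
--
--     marked = {player}
--     for _ in range(rows * cols):
--         new = {v for u in marked for v in nbrs(*u) if v not in marked}
--         if not new:
--             break
--         marked |= new
--
--     return all((r, c) in marked
--                for r, row in enumerate(grid)
--                for c, v in enumerate(row[:cols]) if v in (0, 2))
-- ===== Notes on version B (the rewrite author's own statement) =====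
-- stated objective: alternative
-- what changed: The queue-based BFS from the spawn is replaced by round-based saturation (label propagation): the marked set is repeatedly extended by all unmarked neighbors of marked cells until a fixpoint, and spawn/pellet scans use enumerate/slice comprehensions instead of index loops and modular arithmetic instead of explicit tunnel-wrap branches.
-- outside the precondition, e.g. on is_map_playable([[3, 1, 0], [1]]): A returns False, B returns False; on is_map_playable([]): A raises IndexError, B raises IndexError
import Mathlib
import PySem

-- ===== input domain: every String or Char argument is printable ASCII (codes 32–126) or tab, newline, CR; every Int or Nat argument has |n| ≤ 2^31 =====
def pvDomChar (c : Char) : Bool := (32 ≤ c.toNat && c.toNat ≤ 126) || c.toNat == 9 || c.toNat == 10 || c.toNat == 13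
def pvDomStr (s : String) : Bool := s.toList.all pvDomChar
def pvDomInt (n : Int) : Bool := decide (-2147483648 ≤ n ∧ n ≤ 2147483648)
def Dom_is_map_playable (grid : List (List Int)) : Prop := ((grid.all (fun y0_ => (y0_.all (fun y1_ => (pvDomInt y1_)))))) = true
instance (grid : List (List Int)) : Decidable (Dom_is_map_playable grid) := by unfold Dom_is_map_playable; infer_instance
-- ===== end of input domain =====

-- B replaces A's queue-based BFS reachability check by round-based saturation of the
-- marked set (alternative algorithm, same return value; no argument is mutated).

-- ===== PORT A =====

def pvCell (grid : List (List Int)) (r c : Int) : Int :=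
  (PySem.List.pyGet? ((PySem.List.pyGet? grid r).getD []) c).getD 1

def pvNbrsAStep (grid : List (List Int)) (u : Int × Int) (acc : List (Int × Int))
    (d : Int × Int) : List (Int × Int) :=
  let rows := grid.length
  let cols := ((PySem.List.pyGet? grid 0).getD []).length
  let tr := PySem.Int.floordiv (rows : Int) 2
  let nr := u.1 + d.1
  let nc := u.2 + d.2
  if 0 ≤ nr ∧ nr < (rows : Int) ∧ 0 ≤ nc ∧ nc < (cols : Int) then
    (if pvCell grid nr nc ≠ 1 then acc ++ [(nr, nc)] else acc)
  else if d.2 = -1 ∧ nc < 0 ∧ u.1 = tr then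
    (if pvCell grid u.1 ((cols : Int) - 1) ≠ 1 then acc ++ [(u.1, (cols : Int) - 1)] else acc)
  else if d.2 = 1 ∧ (cols : Int) ≤ nc ∧ u.1 = tr then
    (if pvCell grid u.1 0 ≠ 1 then acc ++ [(u.1, 0)] else acc)
  else acc

-- neighbors_of: the yields collected in order over the four directions

def pvNbrsA (grid : List (List Int)) (u : Int × Int) : List (Int × Int) :=
  [((-1 : Int), (0 : Int)), (1, 0), (0, -1), (0, 1)].foldl (pvNbrsAStep grid u) []

def pvBfs (grid : List (List Int)) : Nat → List (Int × Int) → PySem.Set (Int × Int) → PySem.Set (Int × Int)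
  | 0, _, seen => seen
  | _ + 1, [], seen => seen
  | fuel + 1, u :: q, seen =>
      let st := (pvNbrsA grid u).foldl
        (fun (st : List (Int × Int) × PySem.Set (Int × Int)) v =>
          if v ∈ st.2 then st else (st.1 ++ [v], PySem.Set.add st.2 v)) (q, seen)
      pvBfs grid fuel st.1 st.2

def pvReachA (grid : List (List Int)) (start : Int × Int) : PySem.Set (Int × Int) :=
  let rows := grid.length
  let cols := ((PySem.List.pyGet? grid 0).getD []).length
  if 0 ≤ start.1 ∧ start.1 < (rows : Int) ∧ 0 ≤ start.2 ∧ start.2 < (cols : Int) then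
    pvBfs grid (rows * cols) [start] (PySem.Set.ofList [start])
  else []

def pvSpawnA (grid : List (List Int)) (rows cols : Nat) : Option (Int × Int) :=
  (List.range rows).findSome? fun (r : Nat) =>
    (List.range cols).findSome? fun (c : Nat) =>
      if pvCell grid (r : Int) (c : Int) = 3 then some ((r : Int), (c : Int)) else none

def is_map_playable (grid : List (List Int)) : Bool :=
  let rows := grid.length
  let cols := ((PySem.List.pyGet? grid 0).getD []).length
  match pvSpawnA grid rows cols with
  | none => false
  | some p =>
      let seen := pvReachA grid p
      (List.range rows).all fun (r : Nat) => (List.range cols).all fun (c : Nat) =>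
        if pvCell grid (r : Int) (c : Int) = 0 ∨ pvCell grid (r : Int) (c : Int) = 2 then
          decide (((r : Int), (c : Int)) ∈ seen)
        else true

-- ===== PORT B =====

def pvNbrsB (grid : List (List Int)) (rows cols : Nat) (tr : Int) (u : Int × Int) : List (Int × Int) :=
  (([(u.1 - 1, u.2), (u.1 + 1, u.2)] ++
    (if u.1 = tr then
        [(u.1, PySem.Int.mod (u.2 - 1) (cols : Int)), (u.1, PySem.Int.mod (u.2 + 1) (cols : Int))]
      else [(u.1, u.2 - 1), (u.1, u.2 + 1)])).filter
    fun v => decide (0 ≤ v.1 ∧ v.1 < (rows : Int) ∧ 0 ≤ v.2 ∧ v.2 < (cols : Int)) &&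
             (pvCell grid v.1 v.2 != 1))

def pvSatNew (grid : List (List Int)) (rows cols : Nat) (tr : Int)
    (marked : PySem.Set (Int × Int)) : PySem.Set (Int × Int) :=
  marked.foldl (fun acc u => (pvNbrsB grid rows cols tr u).foldl
      (fun acc v => if v ∈ marked then acc else PySem.Set.add acc v) acc) []

def pvSat (grid : List (List Int)) (rows cols : Nat) (tr : Int) :
    Nat → PySem.Set (Int × Int) → PySem.Set (Int × Int)
  | 0, marked => marked
  | k + 1, marked =>
      let nw := pvSatNew grid rows cols tr marked
      if nw = [] then marked else pvSat grid rows cols tr k (PySem.Set.union marked nw)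

def pvSpawnB (grid : List (List Int)) (cols : Nat) : Option (Int × Int) :=
  (PySem.List.enumerate grid 0).findSome? fun rrow =>
    (PySem.List.enumerate (PySem.List.slice rrow.2 none (some (cols : Int))) 0).findSome? fun cv =>
      if cv.2 = 3 then some (rrow.1, cv.1) else none

def is_map_playable_alt (grid : List (List Int)) : Bool :=
  let rows := grid.length
  let cols := ((PySem.List.pyGet? grid 0).getD []).length
  let tr := PySem.Int.floordiv (rows : Int) 2
  match pvSpawnB grid cols with
  | none => false
  | some p =>
      let marked := pvSat grid rows cols tr (rows * cols) (PySem.Set.ofList [p])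
      (PySem.List.enumerate grid 0).all fun rrow =>
        (PySem.List.enumerate (PySem.List.slice rrow.2 none (some (cols : Int))) 0).all fun cv =>
          if cv.2 = 0 ∨ cv.2 = 2 then decide ((rrow.1, cv.1) ∈ marked) else true

-- ===== PRECONDITION & SPEC =====

-- Pre_ excludes the empty grid and grids having a row shorter than row 0: there the
-- Python A raises IndexError (except for a few ragged grids where an early pellet-check
-- failure returns False before any short row is indexed).
def Pre_is_map_playable (grid : List (List Int)) : Prop :=
  grid ≠ [] ∧ ∀ row ∈ grid, grid.headI.length ≤ row.length

instance (grid : List (List Int)) : Decidable (Pre_is_map_playable grid) := by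
  unfold Pre_is_map_playable; infer_instance

def pvWitness_is_map_playable : List (List Int) := [[3, 0], [0, 2]]

def Spec_is_map_playable (grid : List (List Int)) (out : Bool) : Prop := out = is_map_playable_alt grid
instance (grid : List (List Int)) (out : Bool) : Decidable (Spec_is_map_playable grid out) := by unfold Spec_is_map_playable; infer_instance

-- ===== CLAIM (what is proved, stated in full; the proofs are below) =====
def Claim_equal_is_map_playable : Prop := ∀ (grid : List (List Int)), Dom_is_map_playable grid → Pre_is_map_playable grid → Spec_is_map_playable grid (is_map_playable grid)

-- ===== LEMMAS AND PROOFS =====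

def pvIn (rows cols : Nat) (u : Int × Int) : Prop :=
  0 ≤ u.1 ∧ u.1 < (rows : Int) ∧ 0 ≤ u.2 ∧ u.2 < (cols : Int)

def pvNbrSpec (grid : List (List Int)) (rows cols : Nat) (tr : Int) (u v : Int × Int) : Prop :=
  pvIn rows cols v ∧ pvCell grid v.1 v.2 ≠ 1 ∧
    (v = (u.1 - 1, u.2) ∨ v = (u.1 + 1, u.2) ∨
     (u.1 = tr ∧ (v = (u.1, PySem.Int.mod (u.2 - 1) (cols : Int)) ∨ v = (u.1, PySem.Int.mod (u.2 + 1) (cols : Int)))) ∨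
     (u.1 ≠ tr ∧ (v = (u.1, u.2 - 1) ∨ v = (u.1, u.2 + 1))))

theorem mem_pvNbrsB (grid : List (List Int)) (rows cols : Nat) (tr : Int) (u v : Int × Int) :
    v ∈ pvNbrsB grid rows cols tr u ↔ pvNbrSpec grid rows cols tr u v := by
  simp only [pvNbrsB, pvNbrSpec, pvIn, List.mem_filter, List.mem_append, List.mem_cons,
    Bool.and_eq_true, decide_eq_true_eq, bne_iff_ne]
  by_cases h : u.1 = tr <;> simp [h] <;> tauto

-- one direction (dr, dc) of neighbors_of's loop body

def pvDirA (grid : List (List Int)) (u d : Int × Int) : List (Int × Int) :=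
  let rows := grid.length
  let cols := ((PySem.List.pyGet? grid 0).getD []).length
  let tr := PySem.Int.floordiv (rows : Int) 2
  let nr := u.1 + d.1
  let nc := u.2 + d.2
  if 0 ≤ nr ∧ nr < (rows : Int) ∧ 0 ≤ nc ∧ nc < (cols : Int) then
    (if pvCell grid nr nc ≠ 1 then [(nr, nc)] else [])
  else if d.2 = -1 ∧ nc < 0 ∧ u.1 = tr then
    (if pvCell grid u.1 ((cols : Int) - 1) ≠ 1 then [(u.1, (cols : Int) - 1)] else [])
  else if d.2 = 1 ∧ (cols : Int) ≤ nc ∧ u.1 = tr then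
    (if pvCell grid u.1 0 ≠ 1 then [(u.1, 0)] else [])
  else []

theorem pvNbrsA_eq_flatMap (grid : List (List Int)) (u : Int × Int) :
    pvNbrsA grid u = [((-1 : Int), (0 : Int)), (1, 0), (0, -1), (0, 1)].flatMap (pvDirA grid u) := by
  have hstep : ∀ (acc : List (Int × Int)) (d : Int × Int),
      pvNbrsAStep grid u acc d = acc ++ pvDirA grid u d := by
    intro acc d; simp only [pvNbrsAStep, pvDirA]; split_ifs <;> simp
  unfold pvNbrsA
  simp [List.foldl_cons, List.foldl_nil, hstep, List.flatMap]

set_option maxHeartbeats 1000000 in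
theorem mem_pvNbrsA (grid : List (List Int)) (u v : Int × Int)
    (hu : pvIn grid.length ((PySem.List.pyGet? grid 0).getD []).length u) :
    v ∈ pvNbrsA grid u ↔ pvNbrSpec grid grid.length ((PySem.List.pyGet? grid 0).getD []).length
      (PySem.Int.floordiv (grid.length : Int) 2) u v := by
  obtain ⟨h1, h2, h3, h4⟩ := hu
  have hcpos : (0:Int) < (((PySem.List.pyGet? grid 0).getD []).length : Int) := by omega
  have hm1 : PySem.Int.mod (u.2 - 1) (((PySem.List.pyGet? grid 0).getD []).length : Int) =
      if u.2 = 0 then (((PySem.List.pyGet? grid 0).getD []).length : Int) - 1 else u.2 - 1 := by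
    rw [PySem.Int.mod_eq_emod_of_pos hcpos]; split_ifs with h0
    · have : u.2 - 1 = (((PySem.List.pyGet? grid 0).getD []).length : Int) - 1 +
          (((PySem.List.pyGet? grid 0).getD []).length : Int) * (-1) := by omega
      rw [this, Int.add_mul_emod_self_left, Int.emod_eq_of_lt (by omega) (by omega)]
    · exact Int.emod_eq_of_lt (by omega) (by omega)
  have hm2 : PySem.Int.mod (u.2 + 1) (((PySem.List.pyGet? grid 0).getD []).length : Int) =
      if u.2 + 1 = (((PySem.List.pyGet? grid 0).getD []).length : Int) then 0 else u.2 + 1 := by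
    rw [PySem.Int.mod_eq_emod_of_pos hcpos]; split_ifs with h0
    · rw [h0, Int.emod_self]
    · exact Int.emod_eq_of_lt (by omega) (by omega)
  rw [pvNbrsA_eq_flatMap]
  simp only [pvNbrSpec, pvIn, List.flatMap_cons, List.flatMap_nil, List.mem_append,
    List.append_nil]
  simp only [pvDirA, hm1, hm2]
  norm_num
  ring_nf
  obtain ⟨a, b⟩ := v
  generalize (pvCell grid) = f at *
  generalize (((PySem.List.pyGet? grid 0).getD []).length : Int) = C at *
  generalize ((grid.length : Nat) : Int) = R at *
  clear hm1 hm2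
  have mem_ite : ∀ (c : Prop) [Decidable c] (l l' : List (Int × Int)) (x : Int × Int),
      (x ∈ if c then l else l') ↔ ((c ∧ x ∈ l) ∨ (¬c ∧ x ∈ l')) := by
    intro c _ l l' x; split_ifs <;> simp_all
  simp only [mem_ite, List.not_mem_nil, and_false, false_or, or_false, Prod.mk.injEq]
  by_cases hz : u.2 = 0 <;> by_cases he : 1 + u.2 = C <;>
    simp only [hz, he, List.mem_singleton, Prod.mk.injEq, reduceIte, if_true] <;>
    (try rw [show (if 1 + 0 = C then (0:Int) else 1 + 0) = 0 from if_pos (by omega)]) <;>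
    (try rw [show (if 1 + 0 = C then (0:Int) else 1 + 0) = 1 + 0 from if_neg (by omega)]) <;>
    constructor <;> intro h
  all_goals try (rcases h with ⟨hb,hf,rfl,rfl⟩ | ⟨hb,hf,rfl,rfl⟩ |
      (⟨hb,hf,rfl,rfl⟩ | ⟨hb1,⟨hc1,ht⟩,hf,rfl,rfl⟩) |
      (⟨hb,hf,rfl,rfl⟩ | ⟨hb1,⟨hc1,ht⟩,hf,rfl,rfl⟩) <;>
    exact ⟨⟨by omega, by omega, by omega, by omega⟩, hf, by omega⟩)
  all_goals obtain ⟨hb, hf, hd⟩ := h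
  all_goals rcases hd with ⟨rfl,rfl⟩ | ⟨rfl,rfl⟩ | ⟨ht, (⟨rfl,rfl⟩ | ⟨rfl,rfl⟩)⟩ |
      ⟨ht, (⟨rfl,rfl⟩ | ⟨rfl,rfl⟩)⟩
  all_goals first
    | exact Or.inl ⟨⟨by omega, by omega, by omega, by omega⟩, hf, rfl, rfl⟩
    | exact Or.inr (Or.inl ⟨⟨by omega, by omega, by omega, by omega⟩, hf, rfl, rfl⟩)
    | exact Or.inr (Or.inr (Or.inl (Or.inl ⟨⟨by omega, by omega, by omega, by omega⟩, hf, rfl, rfl⟩)))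
    | exact Or.inr (Or.inr (Or.inl (Or.inr ⟨by omega, ⟨by omega, ht⟩, hf, rfl, rfl⟩)))
    | exact Or.inr (Or.inr (Or.inr (Or.inl ⟨⟨by omega, by omega, by omega, by omega⟩, hf, rfl, rfl⟩)))
    | exact Or.inr (Or.inr (Or.inr (Or.inr ⟨by omega, ⟨by omega, ht⟩, hf, rfl, rfl⟩)))

def pvCells (rows cols : Nat) : List (Int × Int) :=
  (List.range rows).flatMap fun (r : Nat) => (List.range cols).map fun (c : Nat) => ((r : Int), (c : Int))

theorem mem_pvCells (rows cols : Nat) (u : Int × Int) :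
    u ∈ pvCells rows cols ↔ pvIn rows cols u := by
  unfold pvCells
  constructor
  · intro h
    rcases List.mem_flatMap.mp h with ⟨r, hr, hm⟩
    rcases List.mem_map.mp hm with ⟨c, hc, rfl⟩
    have hr' := List.mem_range.mp hr
    have hc' := List.mem_range.mp hc
    exact ⟨Int.natCast_nonneg r, by simp; omega, Int.natCast_nonneg c, by simp; omega⟩
  · rintro ⟨ha, hb, hc, hd⟩
    refine List.mem_flatMap.mpr ⟨u.1.toNat, List.mem_range.mpr (by omega),
      List.mem_map.mpr ⟨u.2.toNat, List.mem_range.mpr (by omega), ?_⟩⟩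
    rw [Int.toNat_of_nonneg ha, Int.toNat_of_nonneg hc]

theorem pvCells_length (rows cols : Nat) : (pvCells rows cols).length = rows * cols := by
  simp [pvCells]

def pvClosed (grid : List (List Int)) (S : List (Int × Int)) : Prop :=
  ∀ u ∈ S, ∀ v ∈ pvNbrsA grid u, v ∈ S

theorem pvBfs_fold (ns : List (Int × Int)) : ∀ (q seen : List (Int × Int)), ∃ t,
    ns.foldl (fun (st : List (Int × Int) × PySem.Set (Int × Int)) v =>
      if v ∈ st.2 then st else (st.1 ++ [v], PySem.Set.add st.2 v)) (q, seen) = (q ++ t, seen ++ t) ∧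
    t.Nodup ∧ (∀ v ∈ t, v ∈ ns ∧ v ∉ seen) ∧ (∀ v ∈ ns, v ∈ seen ∨ v ∈ t) := by
  induction ns with
  | nil => intro q seen; exact ⟨[], by simp⟩
  | cons v ns ih =>
    intro q seen
    by_cases hv : v ∈ seen
    · obtain ⟨t, heq, hnd, hmem, hcov⟩ := ih q seen
      refine ⟨t, ?_, hnd, fun x hx => ⟨List.mem_cons_of_mem _ (hmem x hx).1, (hmem x hx).2⟩, ?_⟩
      · rw [List.foldl_cons, if_pos hv]; exact heq
      · intro x hx
        rcases List.mem_cons.mp hx with rfl | hx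
        · exact Or.inl hv
        · exact hcov x hx
    · obtain ⟨t, heq, hnd, hmem, hcov⟩ := ih (q ++ [v]) (seen ++ [v])
      refine ⟨v :: t, ?_, ?_, ?_, ?_⟩
      · rw [List.foldl_cons, if_neg hv, PySem.Set.add_of_not_mem hv, heq]
        simp
      · refine List.nodup_cons.mpr ⟨?_, hnd⟩
        intro hvt
        exact (hmem v hvt).2 (by simp)
      · intro x hx
        rcases List.mem_cons.mp hx with rfl | hx
        · exact ⟨List.mem_cons_self, hv⟩
        · obtain ⟨h1, h2⟩ := hmem x hx
          exact ⟨List.mem_cons_of_mem _ h1, fun hc => h2 (List.mem_append_left _ hc)⟩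
      · intro x hx
        rcases List.mem_cons.mp hx with rfl | hx
        · exact Or.inr List.mem_cons_self
        · rcases hcov x hx with hs | ht
          · rcases List.mem_append.mp hs with hs | hs
            · exact Or.inl hs
            · exact Or.inr (List.mem_cons.mpr (Or.inl (List.mem_singleton.mp hs)))
          · exact Or.inr (List.mem_cons_of_mem _ ht)

theorem pvBfs_min (grid : List (List Int)) (S : List (Int × Int)) (hS : pvClosed grid S) :
    ∀ (fuel : Nat) (q seen : List (Int × Int)), (∀ x ∈ q, x ∈ seen) → (∀ x ∈ seen, x ∈ S) →
    ∀ x ∈ pvBfs grid fuel q seen, x ∈ S := by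
  intro fuel
  induction fuel with
  | zero => intro q seen _ hseen x hx; exact hseen x hx
  | succ fuel ih =>
    intro q seen hq hseen x hx
    match q with
    | [] => exact hseen x hx
    | u :: q =>
      obtain ⟨t, heq, _, hmem, _⟩ := pvBfs_fold (pvNbrsA grid u) q seen
      rw [pvBfs, heq] at hx
      refine ih _ _ ?_ ?_ x hx
      · intro y hy
        rcases List.mem_append.mp hy with hy | hy
        · exact List.mem_append_left _ (hq y (List.mem_cons_of_mem _ hy))
        · exact List.mem_append_right _ hy
      · intro y hy
        rcases List.mem_append.mp hy with hy | hy
        · exact hseen y hy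
        · exact hS u (hseen u (hq u List.mem_cons_self)) y (hmem y hy).1

theorem pvNbrsA_in (grid : List (List Int)) (u v : Int × Int)
    (hu : pvIn grid.length ((PySem.List.pyGet? grid 0).getD []).length u)
    (hv : v ∈ pvNbrsA grid u) :
    pvIn grid.length ((PySem.List.pyGet? grid 0).getD []).length v :=
  ((mem_pvNbrsA grid u v hu).mp hv).1

theorem pvBfs_big (grid : List (List Int)) :
    ∀ (fuel : Nat) (q seen : List (Int × Int)),
    (∀ x ∈ q, x ∈ seen) → seen.Nodup →
    (∀ x ∈ seen, pvIn grid.length ((PySem.List.pyGet? grid 0).getD []).length x) →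
    (∀ x ∈ seen, x ∈ q ∨ ∀ v ∈ pvNbrsA grid x, v ∈ seen) →
    q.length + (grid.length * ((PySem.List.pyGet? grid 0).getD []).length - seen.length) ≤ fuel →
    (∀ x ∈ seen, x ∈ pvBfs grid fuel q seen) ∧
    (∀ x ∈ pvBfs grid fuel q seen, pvIn grid.length ((PySem.List.pyGet? grid 0).getD []).length x) ∧
    pvClosed grid (pvBfs grid fuel q seen) := by
  intro fuel
  induction fuel with
  | zero =>
    intro q seen hq hnd hin hinv hfuel
    have hq0 : q = [] := List.eq_nil_of_length_eq_zero (by omega)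
    subst hq0
    refine ⟨fun x hx => hx, hin, ?_⟩
    intro x hx v hv
    rcases hinv x hx with h | h
    · exact absurd h (List.not_mem_nil)
    · exact h v hv
  | succ fuel ih =>
    intro q seen hq hnd hin hinv hfuel
    match q with
    | [] =>
      refine ⟨fun x hx => hx, hin, ?_⟩
      intro x hx v hv
      rcases hinv x hx with h | h
      · exact absurd h (List.not_mem_nil)
      · exact h v hv
    | u :: q =>
      obtain ⟨t, heq, hndt, hmemt, hcov⟩ := pvBfs_fold (pvNbrsA grid u) q seen
      have hu : u ∈ seen := hq u List.mem_cons_self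
      have huin := hin u hu
      have htin : ∀ x ∈ t, pvIn grid.length ((PySem.List.pyGet? grid 0).getD []).length x :=
        fun x hx => pvNbrsA_in grid u x huin (hmemt x hx).1
      have hnd' : (seen ++ t).Nodup :=
        List.nodup_append'.mpr ⟨hnd, hndt, List.disjoint_left.mpr
          (fun a ha hb => (hmemt a hb).2 ha)⟩
      have hin' : ∀ x ∈ seen ++ t, pvIn grid.length ((PySem.List.pyGet? grid 0).getD []).length x := by
        intro x hx
        rcases List.mem_append.mp hx with hx | hx
        · exact hin x hx
        · exact htin x hx
      have hsub : seen ++ t ⊆ pvCells grid.length ((PySem.List.pyGet? grid 0).getD []).length := by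
        intro x hx
        exact (mem_pvCells _ _ x).mpr (hin' x hx)
      have hlen : (seen ++ t).length ≤
          grid.length * ((PySem.List.pyGet? grid 0).getD []).length := by
        have := (List.subperm_of_subset hnd' hsub).length_le
        rwa [pvCells_length] at this
      have hq' : ∀ x ∈ q ++ t, x ∈ seen ++ t := by
        intro x hx
        rcases List.mem_append.mp hx with hx | hx
        · exact List.mem_append_left _ (hq x (List.mem_cons_of_mem _ hx))
        · exact List.mem_append_right _ hx
      have hinv' : ∀ x ∈ seen ++ t, x ∈ q ++ t ∨ ∀ v ∈ pvNbrsA grid x, v ∈ seen ++ t := by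
        intro x hx
        rcases List.mem_append.mp hx with hx | hx
        · rcases hinv x hx with hxq | hcl
          · rcases List.mem_cons.mp hxq with rfl | hxq
            · refine Or.inr ?_
              intro v hv
              rcases hcov v hv with h | h
              · exact List.mem_append_left _ h
              · exact List.mem_append_right _ h
            · exact Or.inl (List.mem_append_left _ hxq)
          · exact Or.inr (fun v hv => List.mem_append_left _ (hcl v hv))
        · exact Or.inl (List.mem_append_right _ hx)
      have hfuel' : (q ++ t).length +
          (grid.length * ((PySem.List.pyGet? grid 0).getD []).length - (seen ++ t).length) ≤ fuel := by
        generalize hN : grid.length * ((PySem.List.pyGet? grid 0).getD []).length = N at *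
        simp only [List.length_append, List.length_cons] at *
        omega
      have hres := ih (q ++ t) (seen ++ t) hq' hnd' hin' hinv' hfuel'
      rw [pvBfs, heq]
      exact ⟨fun x hx => hres.1 x (List.mem_append_left _ hx), hres.2.1, hres.2.2⟩

def pvClosedB (grid : List (List Int)) (rows cols : Nat) (tr : Int) (S : List (Int × Int)) : Prop :=
  ∀ u ∈ S, ∀ v ∈ pvNbrsB grid rows cols tr u, v ∈ S

theorem pvNbrsB_in (grid : List (List Int)) (rows cols : Nat) (tr : Int) (u v : Int × Int)
    (hv : v ∈ pvNbrsB grid rows cols tr u) : pvIn rows cols v :=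
  ((mem_pvNbrsB grid rows cols tr u v).mp hv).1

theorem pvSatNew_inner (marked : List (Int × Int)) (ns : List (Int × Int)) :
    ∀ acc : List (Int × Int),
    (∀ y, y ∈ ns.foldl (fun acc v => if v ∈ marked then acc else PySem.Set.add acc v) acc ↔
      y ∈ acc ∨ (y ∈ ns ∧ y ∉ marked)) ∧
    (acc.Nodup → (ns.foldl (fun acc v => if v ∈ marked then acc else PySem.Set.add acc v) acc).Nodup) := by
  induction ns with
  | nil => intro acc; simp
  | cons v ns ih =>
    intro acc
    rw [List.foldl_cons]
    by_cases hv : v ∈ marked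
    · rw [if_pos hv]
      obtain ⟨hmem, hnd⟩ := ih acc
      refine ⟨?_, hnd⟩
      intro y
      rw [hmem y]
      constructor
      · rintro (h | ⟨h1, h2⟩)
        · exact Or.inl h
        · exact Or.inr ⟨List.mem_cons_of_mem _ h1, h2⟩
      · rintro (h | ⟨h1, h2⟩)
        · exact Or.inl h
        · rcases List.mem_cons.mp h1 with rfl | h1
          · exact absurd hv h2
          · exact Or.inr ⟨h1, h2⟩
    · rw [if_neg hv]
      obtain ⟨hmem, hnd⟩ := ih (PySem.Set.add acc v)
      refine ⟨?_, fun h => hnd (PySem.Set.nodup_add _ _ h)⟩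
      intro y
      rw [hmem y, PySem.Set.mem_add]
      constructor
      · rintro ((h | rfl) | ⟨h1, h2⟩)
        · exact Or.inl h
        · exact Or.inr ⟨List.mem_cons_self, hv⟩
        · exact Or.inr ⟨List.mem_cons_of_mem _ h1, h2⟩
      · rintro (h | ⟨h1, h2⟩)
        · exact Or.inl (Or.inl h)
        · rcases List.mem_cons.mp h1 with rfl | h1
          · exact Or.inl (Or.inr rfl)
          · exact Or.inr ⟨h1, h2⟩

theorem pvSatNew_spec (grid : List (List Int)) (rows cols : Nat) (tr : Int)
    (marked : List (Int × Int)) :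
    (∀ y, y ∈ pvSatNew grid rows cols tr marked ↔
      (∃ u ∈ marked, y ∈ pvNbrsB grid rows cols tr u) ∧ y ∉ marked) ∧
    (pvSatNew grid rows cols tr marked).Nodup := by
  unfold pvSatNew
  suffices h : ∀ (us acc : List (Int × Int)),
      (∀ y, y ∈ us.foldl (fun acc u => (pvNbrsB grid rows cols tr u).foldl
          (fun acc v => if v ∈ marked then acc else PySem.Set.add acc v) acc) acc ↔
        y ∈ acc ∨ ((∃ u ∈ us, y ∈ pvNbrsB grid rows cols tr u) ∧ y ∉ marked)) ∧
      (acc.Nodup → (us.foldl (fun acc u => (pvNbrsB grid rows cols tr u).foldl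
          (fun acc v => if v ∈ marked then acc else PySem.Set.add acc v) acc) acc).Nodup) by
    obtain ⟨h1, h2⟩ := h marked []
    exact ⟨fun y => by simpa using h1 y, h2 List.nodup_nil⟩
  intro us
  induction us with
  | nil => intro acc; simp
  | cons u us ih =>
    intro acc
    rw [List.foldl_cons]
    obtain ⟨hinner, hinnernd⟩ := pvSatNew_inner marked (pvNbrsB grid rows cols tr u) acc
    obtain ⟨hmem, hnd⟩ := ih ((pvNbrsB grid rows cols tr u).foldl
      (fun acc v => if v ∈ marked then acc else PySem.Set.add acc v) acc)
    refine ⟨?_, fun h => hnd (hinnernd h)⟩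
    intro y
    rw [hmem y, hinner y]
    constructor
    · rintro ((h | ⟨h1, h2⟩) | ⟨⟨w, hw1, hw2⟩, h2⟩)
      · exact Or.inl h
      · exact Or.inr ⟨⟨u, List.mem_cons_self, h1⟩, h2⟩
      · exact Or.inr ⟨⟨w, List.mem_cons_of_mem _ hw1, hw2⟩, h2⟩
    · rintro (h | ⟨⟨w, hw1, hw2⟩, h2⟩)
      · exact Or.inl (Or.inl h)
      · rcases List.mem_cons.mp hw1 with rfl | hw1
        · exact Or.inl (Or.inr ⟨hw2, h2⟩)
        · exact Or.inr ⟨⟨w, hw1, hw2⟩, h2⟩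

theorem pvSat_min (grid : List (List Int)) (rows cols : Nat) (tr : Int)
    (S : List (Int × Int)) (hS : pvClosedB grid rows cols tr S) :
    ∀ (k : Nat) (M : List (Int × Int)), (∀ x ∈ M, x ∈ S) →
    ∀ x ∈ pvSat grid rows cols tr k M, x ∈ S := by
  intro k
  induction k with
  | zero => intro M hM x hx; exact hM x hx
  | succ k ih =>
    intro M hM x hx
    rw [pvSat] at hx
    by_cases hnw : pvSatNew grid rows cols tr M = []
    · rw [if_pos hnw] at hx; exact hM x hx
    · rw [if_neg hnw] at hx
      obtain ⟨hchar, hnd⟩ := pvSatNew_spec grid rows cols tr M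
      have hdisj : ∀ y ∈ pvSatNew grid rows cols tr M, y ∉ M :=
        fun y hy => ((hchar y).mp hy).2
      rw [show PySem.Set.union M (pvSatNew grid rows cols tr M) = M ++ pvSatNew grid rows cols tr M from PySem.Set.update_eq_append_of_disjoint M _ hnd hdisj] at hx
      refine ih _ ?_ x hx
      intro y hy
      rcases List.mem_append.mp hy with hy | hy
      · exact hM y hy
      · obtain ⟨⟨w, hw1, hw2⟩, _⟩ := (hchar y).mp hy
        exact hS w (hM w hw1) y hw2

theorem pvSat_big (grid : List (List Int)) (rows cols : Nat) (tr : Int) :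
    ∀ (k : Nat) (M : List (Int × Int)), M.Nodup → (∀ x ∈ M, pvIn rows cols x) →
    rows * cols + 1 ≤ k + M.length →
    (∀ x ∈ M, x ∈ pvSat grid rows cols tr k M) ∧
    (∀ x ∈ pvSat grid rows cols tr k M, pvIn rows cols x) ∧
    pvClosedB grid rows cols tr (pvSat grid rows cols tr k M) := by
  intro k
  induction k with
  | zero =>
    intro M hnd hin hcnt
    exfalso
    have hsub : M ⊆ pvCells rows cols := fun x hx => (mem_pvCells _ _ x).mpr (hin x hx)
    have := (List.subperm_of_subset hnd hsub).length_le
    rw [pvCells_length] at this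
    omega
  | succ k ih =>
    intro M hnd hin hcnt
    rw [pvSat]
    obtain ⟨hchar, hnwnd⟩ := pvSatNew_spec grid rows cols tr M
    by_cases hnw : pvSatNew grid rows cols tr M = []
    · rw [if_pos hnw]
      refine ⟨fun x hx => hx, hin, ?_⟩
      intro u hu v hv
      by_contra hvM
      have : v ∈ pvSatNew grid rows cols tr M := (hchar v).mpr ⟨⟨u, hu, hv⟩, hvM⟩
      rw [hnw] at this
      exact absurd this (List.not_mem_nil)
    · rw [if_neg hnw]
      have hdisj : ∀ y ∈ pvSatNew grid rows cols tr M, y ∉ M :=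
        fun y hy => ((hchar y).mp hy).2
      rw [show PySem.Set.union M (pvSatNew grid rows cols tr M) = M ++ pvSatNew grid rows cols tr M from PySem.Set.update_eq_append_of_disjoint M _ hnwnd hdisj]
      have hnd' : (M ++ pvSatNew grid rows cols tr M).Nodup :=
        List.nodup_append'.mpr ⟨hnd, hnwnd, List.disjoint_left.mpr (fun a ha hb => hdisj a hb ha)⟩
      have hin' : ∀ x ∈ M ++ pvSatNew grid rows cols tr M, pvIn rows cols x := by
        intro x hx
        rcases List.mem_append.mp hx with hx | hx
        · exact hin x hx
        · obtain ⟨⟨w, _, hw2⟩, _⟩ := (hchar x).mp hx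
          exact pvNbrsB_in grid rows cols tr w x hw2
      have hcnt' : rows * cols + 1 ≤ k + (M ++ pvSatNew grid rows cols tr M).length := by
        have hlen1 : 1 ≤ (pvSatNew grid rows cols tr M).length := by
          rcases List.exists_mem_of_ne_nil _ hnw with ⟨y, hy⟩
          exact List.length_pos_of_mem hy
        generalize hN : rows * cols = N at *
        simp only [List.length_append] at *
        omega
      obtain ⟨h1, h2, h3⟩ := ih _ hnd' hin' hcnt'
      exact ⟨fun x hx => h1 x (List.mem_append_left _ hx), h2, h3⟩

theorem pvFindSome?_congr {α β : Type} (l : List α) (f g : α → Option β)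
    (h : ∀ x ∈ l, f x = g x) : l.findSome? f = l.findSome? g := by
  induction l with
  | nil => rfl
  | cons x l ih =>
    simp only [List.findSome?_cons]
    rw [h x List.mem_cons_self]
    cases g x with
    | none => exact ih (fun y hy => h y (List.mem_cons_of_mem _ hy))
    | some b => rfl

theorem pvAll_congr {α : Type} (l : List α) (f g : α → Bool)
    (h : ∀ x ∈ l, f x = g x) : l.all f = l.all g := by
  induction l with
  | nil => rfl
  | cons x l ih =>
    simp only [List.all_cons]
    rw [h x List.mem_cons_self, ih (fun y hy => h y (List.mem_cons_of_mem _ hy))]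

theorem pvRange_cast (n : Nat) :
    PySem.List.pyRange 0 (n : Int) 1 = (List.range n).map (fun (k : Nat) => (k : Int)) := by
  rw [PySem.List.pyRange_one]
  simp only [Int.sub_zero, Int.toNat_natCast]
  exact List.map_congr_left (fun k _ => by omega)

theorem pvCell_eq (grid : List (List Int)) (r c : Nat) (hr : r < grid.length)
    (hc : c < grid[r].length) : pvCell grid (r : Int) (c : Int) = grid[r][c] := by
  unfold pvCell
  rw [PySem.List.pyGet?_natCast grid r, List.getElem?_eq_getElem hr]
  simp only [Option.getD_some]
  rw [PySem.List.pyGet?_natCast grid[r] c, List.getElem?_eq_getElem hc]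
  simp

theorem pvSpawn_eq (grid : List (List Int)) (C : Nat)
    (hC : ∀ row ∈ grid, C ≤ row.length) :
    pvSpawnA grid grid.length C = pvSpawnB grid C := by
  unfold pvSpawnA pvSpawnB
  rw [PySem.List.enumerate_eq_map_pyRange grid ([] : List Int), List.findSome?_map]
  simp only [PySem.List.len_eq]
  rw [pvRange_cast, List.findSome?_map]
  apply pvFindSome?_congr
  intro r hr
  have hrlt : r < grid.length := List.mem_range.mp hr
  simp only [Function.comp]
  have hrow : PySem.List.pyGetD grid (r : Int) [] = grid[r] := by
    rw [PySem.List.pyGetD_natCast]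
    exact List.getD_eq_getElem _ _ hrlt
  rw [hrow]
  have hCle : C ≤ grid[r].length := hC _ (grid.getElem_mem hrlt)
  rw [PySem.List.slice_to_natCast]
  rw [PySem.List.enumerate_eq_map_pyRange (grid[r].take C) (0 : Int), List.findSome?_map]
  simp only [PySem.List.len_eq, List.length_take]
  rw [show (min C grid[r].length) = C from by omega]
  rw [pvRange_cast, List.findSome?_map]
  apply pvFindSome?_congr
  intro c hc
  have hclt : c < C := List.mem_range.mp hc
  simp only [Function.comp]
  have hval : PySem.List.pyGetD (grid[r].take C) (c : Int) 0 = grid[r][c] := by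
    rw [PySem.List.pyGetD_natCast]
    rw [List.getD_eq_getElem _ _ (by simpa using (by omega : c < min C grid[r].length))]
    simp [List.getElem_take]
  rw [hval, pvCell_eq grid r c hrlt (by omega)]

theorem pvPellet_eq (grid : List (List Int)) (C : Nat)
    (hC : ∀ row ∈ grid, C ≤ row.length) (S1 S2 : List (Int × Int))
    (hmem : ∀ x, x ∈ S1 ↔ x ∈ S2) :
    ((List.range grid.length).all fun (r : Nat) => (List.range C).all fun (c : Nat) =>
      if pvCell grid (r : Int) (c : Int) = 0 ∨ pvCell grid (r : Int) (c : Int) = 2 then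
        decide (((r : Int), (c : Int)) ∈ S1) else true) =
    ((PySem.List.enumerate grid 0).all fun rrow =>
      (PySem.List.enumerate (PySem.List.slice rrow.2 none (some (C : Int))) 0).all fun cv =>
        if cv.2 = 0 ∨ cv.2 = 2 then decide ((rrow.1, cv.1) ∈ S2) else true) := by
  rw [PySem.List.enumerate_eq_map_pyRange grid ([] : List Int), List.all_map]
  simp only [PySem.List.len_eq]
  rw [pvRange_cast, List.all_map]
  apply pvAll_congr
  intro r hr
  have hrlt : r < grid.length := List.mem_range.mp hr
  simp only [Function.comp]
  have hrow : PySem.List.pyGetD grid (r : Int) [] = grid[r] := by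
    rw [PySem.List.pyGetD_natCast]
    exact List.getD_eq_getElem _ _ hrlt
  rw [hrow]
  have hCle : C ≤ grid[r].length := hC _ (grid.getElem_mem hrlt)
  rw [PySem.List.slice_to_natCast]
  rw [PySem.List.enumerate_eq_map_pyRange (grid[r].take C) (0 : Int), List.all_map]
  simp only [PySem.List.len_eq, List.length_take]
  rw [show (min C grid[r].length) = C from by omega]
  rw [pvRange_cast, List.all_map]
  apply pvAll_congr
  intro c hc
  have hclt : c < C := List.mem_range.mp hc
  simp only [Function.comp]
  have hval : PySem.List.pyGetD (grid[r].take C) (c : Int) 0 = grid[r][c] := by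
    rw [PySem.List.pyGetD_natCast]
    rw [List.getD_eq_getElem _ _ (by simpa using (by omega : c < min C grid[r].length))]
    simp [List.getElem_take]
  rw [hval, pvCell_eq grid r c hrlt (by omega)]
  by_cases hpel : grid[r][c] = 0 ∨ grid[r][c] = 2
  · rw [if_pos hpel, if_pos hpel]
    exact decide_eq_decide.mpr (hmem _)
  · rw [if_neg hpel, if_neg hpel]

theorem pvSpawnA_in (grid : List (List Int)) (rows cols : Nat) (p : Int × Int)
    (h : pvSpawnA grid rows cols = some p) : pvIn rows cols p := by
  obtain ⟨r, hr, h2⟩ := List.exists_of_findSome?_eq_some h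
  obtain ⟨c, hc, h3⟩ := List.exists_of_findSome?_eq_some h2
  have hr' := List.mem_range.mp hr
  have hc' := List.mem_range.mp hc
  by_cases hcell : pvCell grid (r : Int) (c : Int) = 3
  · rw [if_pos hcell] at h3
    obtain rfl := (Option.some.injEq _ _).mp h3
    exact ⟨by omega, by omega, by omega, by omega⟩
  · rw [if_neg hcell] at h3
    exact absurd h3 (by simp)

theorem pvNbrs_eq' (grid : List (List Int)) (u v : Int × Int)
    (hu : pvIn grid.length ((PySem.List.pyGet? grid 0).getD []).length u) :
    (v ∈ pvNbrsB grid grid.length ((PySem.List.pyGet? grid 0).getD []).length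
        (PySem.Int.floordiv (grid.length : Int) 2) u ↔ v ∈ pvNbrsA grid u) := by
  rw [mem_pvNbrsB, mem_pvNbrsA grid u v hu]

theorem pvSets_eq (grid : List (List Int)) (p : Int × Int)
    (hp : pvIn grid.length ((PySem.List.pyGet? grid 0).getD []).length p) :
    ∀ x, x ∈ pvBfs grid (grid.length * ((PySem.List.pyGet? grid 0).getD []).length) [p] [p] ↔
      x ∈ pvSat grid grid.length ((PySem.List.pyGet? grid 0).getD []).length
        (PySem.Int.floordiv (grid.length : Int) 2)
        (grid.length * ((PySem.List.pyGet? grid 0).getD []).length) [p] := by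
  obtain ⟨hp1, hp2, hp3, hp4⟩ := hp
  have hRC : 1 ≤ grid.length * ((PySem.List.pyGet? grid 0).getD []).length := by
    have : 1 ≤ grid.length := by omega
    have : 1 ≤ ((PySem.List.pyGet? grid 0).getD []).length := by omega
    calc 1 = 1 * 1 := rfl
    _ ≤ grid.length * ((PySem.List.pyGet? grid 0).getD []).length := Nat.mul_le_mul (by omega) (by omega)
  have hA := pvBfs_big grid (grid.length * ((PySem.List.pyGet? grid 0).getD []).length) [p] [p]
    (fun x hx => hx) (List.nodup_singleton p)
    (fun x hx => by rw [List.mem_singleton] at hx; subst hx; exact ⟨hp1, hp2, hp3, hp4⟩)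
    (fun x hx => Or.inl hx)
    (by simp only [List.length_singleton]; omega)
  have hB := pvSat_big grid grid.length ((PySem.List.pyGet? grid 0).getD []).length
    (PySem.Int.floordiv (grid.length : Int) 2)
    (grid.length * ((PySem.List.pyGet? grid 0).getD []).length) [p] (List.nodup_singleton p)
    (fun x hx => by rw [List.mem_singleton] at hx; subst hx; exact ⟨hp1, hp2, hp3, hp4⟩)
    (by simp only [List.length_singleton]; omega)
  have hBclosedA : pvClosed grid (pvSat grid grid.length ((PySem.List.pyGet? grid 0).getD []).length
      (PySem.Int.floordiv (grid.length : Int) 2)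
      (grid.length * ((PySem.List.pyGet? grid 0).getD []).length) [p]) :=
    fun u hu v hv => hB.2.2 u hu v ((pvNbrs_eq' grid u v (hB.2.1 u hu)).mpr hv)
  have hAclosedB : pvClosedB grid grid.length ((PySem.List.pyGet? grid 0).getD []).length
      (PySem.Int.floordiv (grid.length : Int) 2)
      (pvBfs grid (grid.length * ((PySem.List.pyGet? grid 0).getD []).length) [p] [p]) :=
    fun u hu v hv => hA.2.2 u hu v ((pvNbrs_eq' grid u v (hA.2.1 u hu)).mp hv)
  intro x
  constructor
  · intro hx
    exact pvBfs_min grid _ hBclosedA _ [p] [p] (fun y hy => hy)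
      (fun y hy => (List.mem_singleton.mp hy) ▸ hB.1 p List.mem_cons_self) x hx
  · intro hx
    exact pvSat_min grid _ _ _ _ hAclosedB _ [p]
      (fun y hy => (List.mem_singleton.mp hy) ▸ hA.1 p List.mem_cons_self) x hx

theorem pv_main (grid : List (List Int)) (hpre : Pre_is_map_playable grid) :
    is_map_playable grid = is_map_playable_alt grid := by
  have hC : ∀ row ∈ grid, ((PySem.List.pyGet? grid 0).getD []).length ≤ row.length := by
    match grid with
    | [] => exact (hpre.1 rfl).elim
    | g0 :: rest =>
      intro row hrow
      have h0 : PySem.List.pyGet? (g0 :: rest) 0 = some g0 := by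
        rw [PySem.List.pyGet?_zero]; rfl
      rw [h0]
      exact hpre.2 row hrow
  unfold is_map_playable is_map_playable_alt
  dsimp only
  rw [← pvSpawn_eq grid _ hC]
  cases hsp : pvSpawnA grid grid.length ((PySem.List.pyGet? grid 0).getD []).length with
  | none => rfl
  | some p =>
    dsimp only
    have hp := pvSpawnA_in grid _ _ p hsp
    have hofl : PySem.Set.ofList [p] = [p] :=
      PySem.Set.ofList_eq_self_of_nodup _ (List.nodup_singleton p)
    have hreach : pvReachA grid p =
        pvBfs grid (grid.length * ((PySem.List.pyGet? grid 0).getD []).length) [p] [p] := by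
      unfold pvReachA
      rw [if_pos ⟨hp.1, hp.2.1, hp.2.2.1, hp.2.2.2⟩, hofl]
    rw [hreach, hofl]
    exact pvPellet_eq grid _ hC _ _ (pvSets_eq grid p hp)

-- ===== VERDICT (by name: the statement is the Claim_ definition above) =====
theorem is_map_playable_spec : Claim_equal_is_map_playable := by
  intro grid _ hpre
  exact pv_main grid hpre
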